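-- pv_equiv track=rewrite | github.com/SaucySteve/ProjectEuler | Euler1.py | euler1_5s
-- ===== SOURCE A (Python) =====
-- def euler1_5s(totalNumber,listOfThrees,listOfFives):
--     newNumber=totalNumber
--     while(newNumber>=5):
--         if(newNumber%5==0):
--             if(newNumber) not in listOfThrees:
--                 listOfFives.append(newNumber)
--             newNumber-=5
--         elif(newNumber%5!=0):
--             newNumber-=1
--     return listOfFives
-- ===== SOURCE B (Python) =====
-- def euler1_5s(totalNumber, listOfThrees, listOfFives):
--     # Set difference computed up front, then one descending sort pass.
--     wanted = set(range(5, totalNumber + 1, 5)) - set(listOfThrees)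
--     listOfFives.extend(sorted(wanted, reverse=True))
--     return listOfFives
-- ===== Notes on version B (the rewrite author's own statement) =====
-- stated objective: idiomatic
-- what changed: Replaced A's descending while-loop that steps by 1/5 and tests list membership per multiple with a set difference (multiples of 5 minus listOfThrees) built up front and a single reverse sort, extended onto listOfFives.
import Mathlib
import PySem

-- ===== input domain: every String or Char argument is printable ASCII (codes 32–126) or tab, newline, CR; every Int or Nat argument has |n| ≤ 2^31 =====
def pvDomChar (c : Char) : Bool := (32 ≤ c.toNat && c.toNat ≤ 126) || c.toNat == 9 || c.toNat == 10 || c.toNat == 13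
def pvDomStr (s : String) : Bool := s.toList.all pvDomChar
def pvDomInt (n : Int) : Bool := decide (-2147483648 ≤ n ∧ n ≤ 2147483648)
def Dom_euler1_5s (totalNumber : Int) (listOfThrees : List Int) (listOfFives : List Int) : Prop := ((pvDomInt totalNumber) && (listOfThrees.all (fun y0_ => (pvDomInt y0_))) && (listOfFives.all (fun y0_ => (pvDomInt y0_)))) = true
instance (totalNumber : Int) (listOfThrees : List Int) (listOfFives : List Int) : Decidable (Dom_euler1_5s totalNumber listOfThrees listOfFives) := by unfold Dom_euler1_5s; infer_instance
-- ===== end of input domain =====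

-- B replaces A's descending membership-testing scan by an up-front set difference plus one
-- reverse sort (idiomatic). Both A and B mutate listOfFives by appending; the theorems are
-- about the returned value.

-- ===== PORT A =====
-- the while-loop of A: state is newNumber and listOfFives (acc)
def euler1_5s_loop (newNumber : Int) (listOfThrees : List Int) (acc : List Int) : List Int :=
  if h : newNumber ≥ 5 then
    if PySem.Int.mod newNumber 5 = 0 then
      euler1_5s_loop (newNumber - 5) listOfThrees
        (if newNumber ∉ listOfThrees then acc ++ [newNumber] else acc)
    else
      -- the Python 'elif newNumber % 5 != 0' is the exact negation of the 'if': plain else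
      euler1_5s_loop (newNumber - 1) listOfThrees acc
  else acc
termination_by newNumber.toNat
decreasing_by all_goals omega

def euler1_5s (totalNumber : Int) (listOfThrees : List Int) (listOfFives : List Int) : List Int :=
  euler1_5s_loop totalNumber listOfThrees listOfFives

-- ===== PORT B =====
def euler1_5s_alt (totalNumber : Int) (listOfThrees : List Int) (listOfFives : List Int) : List Int :=
  let wanted : PySem.Set Int :=
    PySem.Set.diff (PySem.Set.ofList (PySem.List.pyRange 5 (totalNumber + 1) 5))
      (PySem.Set.ofList listOfThrees)
  listOfFives ++ PySem.List.sorted wanted (fun x => x) true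

-- ===== PRECONDITION & SPEC =====
def Spec_euler1_5s (totalNumber : Int) (listOfThrees : List Int) (listOfFives : List Int) (out : List Int) : Prop := out = euler1_5s_alt totalNumber listOfThrees listOfFives
instance (totalNumber : Int) (listOfThrees : List Int) (listOfFives : List Int) (out : List Int) : Decidable (Spec_euler1_5s totalNumber listOfThrees listOfFives out) := by unfold Spec_euler1_5s; infer_instance

-- ===== CLAIM (what is proved, stated in full; the proofs are below) =====
def Claim_equal_euler1_5s : Prop := ∀ (totalNumber : Int) (listOfThrees : List Int) (listOfFives : List Int), Dom_euler1_5s totalNumber listOfThrees listOfFives → Spec_euler1_5s totalNumber listOfThrees listOfFives (euler1_5s totalNumber listOfThrees listOfFives)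

-- ===== LEMMAS AND PROOFS =====

-- ascending multiples of 5 in [5, n], those not in `threes`
def filtFives (n : Int) (threes : List Int) : List Int :=
  (PySem.List.pyRange 5 (n + 1) 5).filter (fun x => decide (x ∉ threes))

theorem pyRange5_lt (n : Int) (h : n < 5) : PySem.List.pyRange 5 (n + 1) 5 = [] := by
  rw [PySem.List.pyRange_of_pos _ _ (by norm_num)]
  have : ¬ (5 : Int) < n + 1 := by omega
  simp [this]

theorem pyRange5_mult (n : Int) (h5 : 5 ≤ n) (hd : (5 : Int) ∣ n) :
    PySem.List.pyRange 5 (n + 1) 5 = PySem.List.pyRange 5 (n - 5 + 1) 5 ++ [n] := by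
  obtain ⟨m, rfl⟩ := hd
  rw [PySem.List.pyRange_of_pos _ _ (by norm_num), PySem.List.pyRange_of_pos _ _ (by norm_num)]
  have hm : 1 ≤ m := by omega
  have h1 : ((5 * m + 1 - 5 + 5 - 1) / 5 : Int).toNat = m.toNat := by
    have : (5 * m + 1 - 5 + 5 - 1 : Int) = 5 * m := by ring
    rw [this, Int.mul_ediv_cancel_left _ (by norm_num)]
  have h2 : ((5 * m - 5 + 1 - 5 + 5 - 1 : Int) / 5).toNat = m.toNat - 1 := by
    have : (5 * m - 5 + 1 - 5 + 5 - 1 : Int) = 5 * (m - 1) := by ring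
    rw [this, Int.mul_ediv_cancel_left _ (by norm_num)]
    omega
  have hlt1 : (5 : Int) < 5 * m + 1 := by omega
  by_cases hlt2 : (5 : Int) < 5 * m - 5 + 1
  · simp only [if_pos hlt1, if_pos hlt2, h1, h2]
    have : m.toNat = (m.toNat - 1) + 1 := by omega
    rw [this, List.range_succ, List.map_append]
    congr 1
    simp only [List.map_cons, List.map_nil]
    congr 1
    omega
  · -- then m = 1
    have hm1 : m = 1 := by omega
    subst hm1
    simp only [if_pos hlt1, if_neg hlt2, h1]
    norm_num [List.range_succ]
theorem pyRange5_notmult (n : Int) (h5 : 5 ≤ n) (hd : ¬ (5 : Int) ∣ n) :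
    PySem.List.pyRange 5 (n + 1) 5 = PySem.List.pyRange 5 n 5 := by
  rw [PySem.List.pyRange_of_pos _ _ (by norm_num), PySem.List.pyRange_of_pos _ _ (by norm_num)]
  have hlt1 : (5 : Int) < n + 1 := by omega
  have hlt2 : (5 : Int) < n := by
    rcases lt_or_eq_of_le h5 with h | h
    · exact h
    · exact absurd ⟨1, by omega⟩ hd
  simp only [if_pos hlt1, if_pos hlt2]
  congr 2
  -- (n + 1 - 5 + 5 - 1) / 5 = (n - 5 + 5 - 1) / 5 since 5 ∤ n
  have e1 : (n + 1 - 5 + 5 - 1 : Int) = n := by ring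
  have e2 : (n - 5 + 5 - 1 : Int) = n - 1 := by ring
  rw [e1, e2]
  have := Int.emod_emod_of_dvd n (dvd_refl 5)
  have hmod : n % 5 ≠ 0 := fun h => hd (Int.dvd_of_emod_eq_zero h)
  omega

theorem filtFives_lt (n : Int) (threes : List Int) (h : n < 5) : filtFives n threes = [] := by
  unfold filtFives; rw [pyRange5_lt n h]; rfl

theorem filtFives_mult (n : Int) (threes : List Int) (h5 : 5 ≤ n) (hd : (5 : Int) ∣ n) :
    filtFives n threes
      = filtFives (n - 5) threes ++ (if n ∉ threes then [n] else []) := by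
  unfold filtFives
  rw [pyRange5_mult n h5 hd, List.filter_append]
  congr 1
  by_cases hmem : n ∈ threes <;> simp [hmem]

theorem filtFives_notmult (n : Int) (threes : List Int) (h5 : 5 ≤ n) (hd : ¬ (5 : Int) ∣ n) :
    filtFives n threes = filtFives (n - 1) threes := by
  unfold filtFives
  rw [pyRange5_notmult n h5 hd]
  congr 2
  omega

theorem mod5_dvd (n : Int) : PySem.Int.mod n 5 = 0 ↔ (5 : Int) ∣ n := by
  simp only [PySem.Int.mod]
  rw [Int.fmod_eq_emod]
  have h := Int.emod_emod_of_dvd n (dvd_refl (5 : Int))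
  constructor
  · intro hh
    exact Int.dvd_of_emod_eq_zero (by omega)
  · intro hd
    have : n % 5 = 0 := Int.emod_eq_zero_of_dvd hd
    simp [this, hd]

-- A's loop produces acc followed by the filtered multiples, largest first
theorem euler1_5s_loop_eq (n : Int) (threes acc : List Int) :
    euler1_5s_loop n threes acc = acc ++ (filtFives n threes).reverse := by
  by_cases h : n ≥ 5
  · rw [euler1_5s_loop]
    by_cases hd : (5 : Int) ∣ n
    · rw [dif_pos h, if_pos ((mod5_dvd n).mpr hd)]
      rw [euler1_5s_loop_eq (n - 5) threes, filtFives_mult n threes h hd]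
      by_cases hmem : n ∈ threes <;>
        simp [hmem, List.append_assoc]
    · rw [dif_pos h, if_neg (fun hc => hd ((mod5_dvd n).mp hc))]
      rw [euler1_5s_loop_eq (n - 1) threes, filtFives_notmult n threes h hd]
  · rw [euler1_5s_loop, dif_neg h, filtFives_lt n threes (by omega)]
    simp
termination_by n.toNat
decreasing_by all_goals omega

theorem nodup_pyRange5 (n : Int) : (PySem.List.pyRange 5 (n + 1) 5).Nodup := by
  rw [PySem.List.pyRange_of_pos _ _ (by norm_num)]
  refine List.Nodup.map ?_ (List.nodup_range)
  intro a b hab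
  simp only at hab
  omega

theorem pairwise_pyRange5 (n : Int) :
    (PySem.List.pyRange 5 (n + 1) 5).Pairwise (· < ·) := by
  rw [PySem.List.pyRange_of_pos _ _ (by norm_num)]
  refine List.pairwise_map.mpr ?_
  refine List.Pairwise.imp ?_ (List.pairwise_lt_range)
  intro a b hab
  omega

-- B's set difference is exactly the filter
theorem diff_eq_filtFives (n : Int) (threes : List Int) :
    PySem.Set.diff (PySem.Set.ofList (PySem.List.pyRange 5 (n + 1) 5))
      (PySem.Set.ofList threes) = filtFives n threes := by
  unfold PySem.Set.diff filtFives
  rw [PySem.Set.ofList_eq_self_of_nodup _ (nodup_pyRange5 n)]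
  apply List.filter_congr
  intro x _
  have : (PySem.Set.ofList threes).contains x = true ↔ x ∈ threes := by
    rw [PySem.Set.contains_iff, PySem.Set.mem_ofList]
  by_cases hx : x ∈ threes <;> simp_all

theorem sorted_rev_filtFives (n : Int) (threes : List Int) :
    PySem.List.sorted (filtFives n threes) (fun x => x) true
      = (filtFives n threes).reverse := by
  apply PySem.List.sorted_rev_eq_of_perm_of_pairwise_gt
  · exact (List.reverse_perm _)
  · rw [List.pairwise_reverse]
    exact List.Pairwise.filter _ (pairwise_pyRange5 n)

-- ===== VERDICT (by name: the statement is the Claim_ definition above) =====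
theorem euler1_5s_spec : Claim_equal_euler1_5s := by
  intro totalNumber listOfThrees listOfFives _
  unfold Spec_euler1_5s euler1_5s euler1_5s_alt
  rw [euler1_5s_loop_eq, diff_eq_filtFives]
  simp only [sorted_rev_filtFives]
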